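-- pv_equiv track=rewrite | github.com/Skizzzz/NOC_Toolkit | noc-toolkit-prod/tools/topology.py | _index_nodes
-- ===== SOURCE A (Python) =====
-- from typing import Dict, Iterable, List, Optional, Tuple
--
-- def _index_nodes(nodes: Optional[List[Dict]]) -> Tuple[Dict[str, Dict], Dict[str, Dict]]:
--     by_ip: Dict[str, Dict] = {}
--     by_caption: Dict[str, Dict] = {}
--     for node in nodes or []:
--         ip = (node.get("ip_address") or "").strip().lower()
--         if ip and ip not in by_ip:
--             by_ip[ip] = node
--         caption = (node.get("caption") or "").strip().lower()
--         if caption and caption not in by_caption: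
--             by_caption[caption] = node
--     return by_ip, by_caption
-- ===== SOURCE B (Python) =====
-- def _index_by(nodes, field):
--     d = {}
--     for node in nodes or []:
--         key = (node.get(field) or "").strip().lower()
--         if key and key not in d:
--             d[key] = node
--     return d
--
-- def _index_nodes(nodes):
--     return _index_by(nodes, "ip_address"), _index_by(nodes, "caption")
-- ===== Notes on version B (the rewrite author's own statement) =====
-- stated objective: idiomatic
-- what changed: Replaces the single combined loop maintaining two dicts with a reusable one-field helper applied in two independent passes (one per field), removing the duplicated get/strip/lower/first-wins logic.
import Mathlib
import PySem

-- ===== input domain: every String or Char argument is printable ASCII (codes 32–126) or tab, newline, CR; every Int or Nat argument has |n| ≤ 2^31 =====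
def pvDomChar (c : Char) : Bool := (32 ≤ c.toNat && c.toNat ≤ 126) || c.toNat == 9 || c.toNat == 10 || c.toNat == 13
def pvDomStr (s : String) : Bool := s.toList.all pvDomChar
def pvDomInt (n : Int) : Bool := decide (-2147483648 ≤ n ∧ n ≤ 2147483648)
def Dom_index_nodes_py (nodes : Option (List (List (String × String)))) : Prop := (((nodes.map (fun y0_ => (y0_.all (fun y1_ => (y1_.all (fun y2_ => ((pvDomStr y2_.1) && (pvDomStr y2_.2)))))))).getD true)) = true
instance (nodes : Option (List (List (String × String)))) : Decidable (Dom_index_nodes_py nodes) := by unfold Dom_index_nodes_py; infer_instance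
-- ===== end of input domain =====

-- ===== PORT A =====
-- One honest line: B factors the loop into a one-field helper applied twice (idiomatic decomposition; same cost).
-- A: one pass over the nodes, updating the by_ip and by_caption association lists together.
def index_nodes_py (nodes : Option (List (List (String × String)))) : (List (String × List (String × String))) × (List (String × List (String × String))) :=
  (nodes.getD []).foldl
    (fun acc node =>
      let ip := PySem.Str.lower (PySem.Str.strip (((node.find? (fun p => p.1 == "ip_address")).map Prod.snd).getD ""))
      let by_ip := if ip != "" && !(acc.1.any (fun p => p.1 == ip)) then acc.1 ++ [(ip, node)] else acc.1
      let caption := PySem.Str.lower (PySem.Str.strip (((node.find? (fun p => p.1 == "caption")).map Prod.snd).getD ""))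
      let by_caption := if caption != "" && !(acc.2.any (fun p => p.1 == caption)) then acc.2 ++ [(caption, node)] else acc.2
      (by_ip, by_caption))
    ([], [])

-- ===== PORT B =====
-- B: a helper indexing the nodes by ONE field; the function is two independent passes.
def pvIndexBy (nodes : Option (List (List (String × String)))) (field : String) : List (String × List (String × String)) :=
  (nodes.getD []).foldl
    (fun d node =>
      let key := PySem.Str.lower (PySem.Str.strip (((node.find? (fun p => p.1 == field)).map Prod.snd).getD ""))
      if key != "" && !(d.any (fun p => p.1 == key)) then d ++ [(key, node)] else d)
    []

def index_nodes_py_alt (nodes : Option (List (List (String × String)))) : (List (String × List (String × String))) × (List (String × List (String × String))) :=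
  (pvIndexBy nodes "ip_address", pvIndexBy nodes "caption")

-- ===== PRECONDITION & SPEC =====
def Spec_index_nodes_py (nodes : Option (List (List (String × String)))) (out : (List (String × List (String × String))) × (List (String × List (String × String)))) : Prop := out = index_nodes_py_alt nodes
instance (nodes : Option (List (List (String × String)))) (out : (List (String × List (String × String))) × (List (String × List (String × String)))) : Decidable (Spec_index_nodes_py nodes out) := by unfold Spec_index_nodes_py; infer_instance

-- ===== CLAIM (what is proved, stated in full; the proofs are below) =====
def Claim_equal_index_nodes_py : Prop := ∀ (nodes : Option (List (List (String × String)))), Dom_index_nodes_py nodes → Spec_index_nodes_py nodes (index_nodes_py nodes)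

-- ===== LEMMAS AND PROOFS =====

-- ===== VERDICT (by name: the statement is the Claim_ definition above) =====
-- The combined fold over the pair is the pair of the two independent folds.
theorem pvFold_pair (l : List (List (String × String)))
    (a b : List (String × List (String × String))) :
    l.foldl
      (fun acc node =>
        let ip := PySem.Str.lower (PySem.Str.strip (((node.find? (fun p => p.1 == "ip_address")).map Prod.snd).getD ""))
        let by_ip := if ip != "" && !(acc.1.any (fun p => p.1 == ip)) then acc.1 ++ [(ip, node)] else acc.1
        let caption := PySem.Str.lower (PySem.Str.strip (((node.find? (fun p => p.1 == "caption")).map Prod.snd).getD ""))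
        let by_caption := if caption != "" && !(acc.2.any (fun p => p.1 == caption)) then acc.2 ++ [(caption, node)] else acc.2
        (by_ip, by_caption))
      (a, b)
    = (l.foldl
        (fun d node =>
          let key := PySem.Str.lower (PySem.Str.strip (((node.find? (fun p => p.1 == "ip_address")).map Prod.snd).getD ""))
          if key != "" && !(d.any (fun p => p.1 == key)) then d ++ [(key, node)] else d) a,
       l.foldl
        (fun d node =>
          let key := PySem.Str.lower (PySem.Str.strip (((node.find? (fun p => p.1 == "caption")).map Prod.snd).getD ""))
          if key != "" && !(d.any (fun p => p.1 == key)) then d ++ [(key, node)] else d) b) := by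
  induction l generalizing a b with
  | nil => rfl
  | cons node rest ih => simp only [List.foldl]; exact ih _ _

theorem index_nodes_py_spec : Claim_equal_index_nodes_py := by
  intro nodes _
  show index_nodes_py nodes = index_nodes_py_alt nodes
  unfold index_nodes_py index_nodes_py_alt pvIndexBy
  exact pvFold_pair (nodes.getD []) [] []
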